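-- pv_equiv track=rewrite | github.com/zhengqingquan/GateWayTool | Gateway_Tool/pyt/src/DBCParseModule/GenTool.py | DBCMotorolaEndBitShift
-- ===== SOURCE A (Python) =====
-- def DBCMotorolaEndBitShift(StartBit: int, Length: int):
--     """
--     计算大端模式的结束位
--     根据lsb计算msb
--     """
--
--     if StartBit % 8 + Length <= 8:
--         StartBit = StartBit + Length - 1
--     else:
--         for i in range(Length - 1):
--             StartBit = StartBit + 1
--             if StartBit % 8 == 0:
--                 StartBit = StartBit - 16
--
--     return StartBit
-- ===== SOURCE B (Python) =====
-- def DBCMotorolaEndBitShift(StartBit: int, Length: int):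
--     if StartBit % 8 + Length <= 8:
--         return StartBit + Length - 1
--     end = StartBit + Length - 1
--     return end - 16 * (end // 8 - StartBit // 8)
-- ===== Notes on version B (the rewrite author's own statement) =====
-- stated objective: faster
-- what changed: Replaces A's per-bit loop (decrementing 16 at each byte boundary) with a closed-form count of byte-boundary crossings via floor division.
import Mathlib
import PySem

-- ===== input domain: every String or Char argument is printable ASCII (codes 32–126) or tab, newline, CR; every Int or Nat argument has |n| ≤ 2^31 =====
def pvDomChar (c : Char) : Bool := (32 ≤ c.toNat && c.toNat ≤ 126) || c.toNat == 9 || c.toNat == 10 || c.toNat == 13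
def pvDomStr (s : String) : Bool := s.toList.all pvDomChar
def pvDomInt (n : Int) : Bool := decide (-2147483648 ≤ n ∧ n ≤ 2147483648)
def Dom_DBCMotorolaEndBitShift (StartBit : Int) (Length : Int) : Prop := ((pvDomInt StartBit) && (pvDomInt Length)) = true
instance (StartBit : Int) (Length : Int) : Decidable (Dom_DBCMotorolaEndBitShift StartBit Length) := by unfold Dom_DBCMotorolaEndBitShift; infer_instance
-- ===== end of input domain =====

-- B replaces A's per-bit loop (with a -16 correction at each byte boundary) by a closed-form
-- count of byte-boundary crossings via floor division; objective: faster (O(Length) → O(1)).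

-- ===== PORT A =====
def DBCMotorolaEndBitShift (StartBit : Int) (Length : Int) : Int :=
  if PySem.Int.mod StartBit 8 + Length ≤ 8 then
    StartBit + Length - 1
  else
    (PySem.List.pyRange 0 (Length - 1) 1).foldl
      (fun s _ =>
        let s := s + 1
        if PySem.Int.mod s 8 = 0 then s - 16 else s)
      StartBit

-- ===== PORT B =====
def DBCMotorolaEndBitShift_alt (StartBit : Int) (Length : Int) : Int :=
  if PySem.Int.mod StartBit 8 + Length ≤ 8 then
    StartBit + Length - 1
  else
    let e := StartBit + Length - 1
    e - 16 * (PySem.Int.floordiv e 8 - PySem.Int.floordiv StartBit 8)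

-- ===== PRECONDITION & SPEC =====
def Spec_DBCMotorolaEndBitShift (StartBit : Int) (Length : Int) (out : Int) : Prop := out = DBCMotorolaEndBitShift_alt StartBit Length
instance (StartBit : Int) (Length : Int) (out : Int) : Decidable (Spec_DBCMotorolaEndBitShift StartBit Length out) := by unfold Spec_DBCMotorolaEndBitShift; infer_instance

-- ===== CLAIM (what is proved, stated in full; the proofs are below) =====
def Claim_equal_DBCMotorolaEndBitShift : Prop := ∀ (StartBit : Int) (Length : Int), Dom_DBCMotorolaEndBitShift StartBit Length → Spec_DBCMotorolaEndBitShift StartBit Length (DBCMotorolaEndBitShift StartBit Length)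

-- ===== LEMMAS AND PROOFS =====

-- A's loop over n steps equals the closed form: each step adds 1 and subtracts 16 exactly when a
-- multiple of 8 is reached; the residue mod 8 is unchanged by the -16 correction, so the number of
-- corrections over n steps is the number of multiples of 8 in (s0, s0+n], i.e. (s0+n)/8 - s0/8.
theorem pv_loop_closed (s0 : Int) (n : Nat) :
    (PySem.List.pyRange 0 (n : Int) 1).foldl
      (fun s _ => let s := s + 1; if PySem.Int.mod s 8 = 0 then s - 16 else s) s0
    = s0 + n - 16 * ((s0 + n) / 8 - s0 / 8) := by
  induction n with
  | zero => simp [PySem.List.pyRange_one_eq_nil]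
  | succ n ih =>
    have h : ((n : Int) + 1) = ((n + 1 : Nat) : Int) := by push_cast; ring
    rw [← h, PySem.List.pyRange_one_succ_right (by positivity),
        List.foldl_append, List.foldl_cons, List.foldl_nil, ih]
    have hm : ∀ a : Int, PySem.Int.mod a 8 = a % 8 :=
      fun a => PySem.Int.mod_eq_emod_of_pos (by norm_num)
    simp only [hm]
    split_ifs with hz <;> omega

-- ===== VERDICT (by name: the statement is the Claim_ definition above) =====
theorem DBCMotorolaEndBitShift_spec : Claim_equal_DBCMotorolaEndBitShift := by
  intro StartBit Length _
  unfold Spec_DBCMotorolaEndBitShift DBCMotorolaEndBitShift DBCMotorolaEndBitShift_alt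
  split_ifs with hcond
  · rfl
  · -- else branch: the modulus is nonnegative, so Length - 1 ≥ 1 ≥ 0
    have hmod : PySem.Int.mod StartBit 8 < 8 := PySem.Int.mod_lt _ (by norm_num)
    have hlen : 0 ≤ Length - 1 := by omega
    obtain ⟨n, hn⟩ : ∃ n : Nat, Length - 1 = (n : Int) := ⟨(Length - 1).toNat, by omega⟩
    rw [hn, pv_loop_closed]
    have hf : ∀ a : Int, PySem.Int.floordiv a 8 = a / 8 :=
      fun a => PySem.Int.floordiv_eq_ediv_of_pos (by norm_num)
    simp only [hf]
    have : StartBit + Length - 1 = StartBit + (n : Int) := by omega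
    rw [this]
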